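-- pv_equiv track=rewrite | github.com/New-Ha/Algorithm | 프로그래머스/unrated/181918. 배열 만들기 4/배열 만들기 4.py | solution
-- ===== SOURCE A (Python) =====
-- def solution(arr):
--     stk = [];
--     i = 0;
--
--     while i < len(arr):
--         if not len(stk):
--             stk.append(arr[i])
--             i += 1;
--         elif stk[len(stk) - 1] < arr[i]:
--             stk.append(arr[i])
--             i += 1;
--         else:
--             stk.pop();
--
--     return stk;
-- ===== SOURCE B (Python) =====
-- def solution(arr):
--     # An element survives A's push/pop process iff it is strictly smaller than
--     # every element after it, so one backward pass with a running minimum suffices.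
--     res = []
--     m = None
--     for x in reversed(arr):
--         if m is None or x < m:
--             res.append(x)
--             m = x
--     res.reverse()
--     return res
-- ===== Notes on version B (the rewrite author's own statement) =====
-- stated objective: alternative
-- what changed: Replaced the stack simulation (push/pop with a stalling index) by a stackless backward scan: the surviving elements are exactly the strict suffix minima, collected right-to-left with a single running-minimum variable and reversed at the end.
import Mathlib
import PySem

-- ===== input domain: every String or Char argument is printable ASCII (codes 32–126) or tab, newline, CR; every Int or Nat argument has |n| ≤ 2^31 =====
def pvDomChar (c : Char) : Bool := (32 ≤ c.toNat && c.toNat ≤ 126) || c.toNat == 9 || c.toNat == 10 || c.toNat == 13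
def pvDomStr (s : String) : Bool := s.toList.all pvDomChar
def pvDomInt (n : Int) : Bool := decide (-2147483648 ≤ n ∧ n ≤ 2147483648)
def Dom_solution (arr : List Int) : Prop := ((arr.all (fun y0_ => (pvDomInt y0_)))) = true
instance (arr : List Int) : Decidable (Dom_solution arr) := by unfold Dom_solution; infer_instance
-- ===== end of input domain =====

-- B replaces A's stack simulation by a stackless backward scan collecting the strict
-- suffix minima with a running minimum (alternative algorithm, same O(n), no speed claim).

-- ===== PORT A =====
-- A's stack is kept top-first (Python's append/pop at the end = cons/tail here; stk[len(stk)-1]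
-- is the head), and the result is reversed back to Python's bottom-first order at the end.
def solutionLoop (arr : List Int) (stk : List Int) (i : Nat) : List Int :=
  if h : i < arr.length then
    if stk.length = 0 then
      solutionLoop arr (arr[i] :: stk) (i + 1)
    else if stk.headD 0 < arr[i] then
      solutionLoop arr (arr[i] :: stk) (i + 1)
    else
      solutionLoop arr stk.tail i
  else stk
termination_by (arr.length - i) * 2 + stk.length
decreasing_by
  all_goals simp only [List.length_cons, List.length_tail]
  all_goals omega

def solution (arr : List Int) : List Int := (solutionLoop arr [] 0).reverse

-- ===== PORT B =====
-- Source B scans reversed(arr) with state (res, m): keep x when m is None or x < m;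
-- `res.append(x)` is `res ++ [x]`, and the final `res.reverse()` is the reverse at the end.
def solution_alt (arr : List Int) : List Int :=
  (arr.reverse.foldl
    (fun (st : List Int × Option Int) x =>
      match st.2 with
      | none => (st.1 ++ [x], some x)
      | some m => if x < m then (st.1 ++ [x], some x) else st)
    ([], none)).1.reverse

-- ===== PRECONDITION & SPEC =====
def Spec_solution (arr : List Int) (out : List Int) : Prop := out = solution_alt arr
instance (arr : List Int) (out : List Int) : Decidable (Spec_solution arr out) := by unfold Spec_solution; infer_instance

-- ===== CLAIM (what is proved, stated in full; the proofs are below) =====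
def Claim_equal_solution : Prop := ∀ (arr : List Int), Dom_solution arr → Spec_solution arr (solution arr)

-- ===== LEMMAS AND PROOFS =====

-- Reference function: elements kept by a left scan under an optional strict upper bound
-- (= the strict running minima of the scanned list).
def km : List Int → Option Int → List Int
  | [], _ => []
  | x :: l, none => x :: km l (some x)
  | x :: l, some m => if x < m then x :: km l (some x) else km l (some m)

theorem km_lt {l : List Int} {m y : Int} (h : y ∈ km l (some m)) : y < m := by
  induction l generalizing m with
  | nil => simp [km] at h
  | cons x l ih =>
    simp only [km] at h
    split at h
    · rcases List.mem_cons.mp h with rfl | h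
      · assumption
      · exact lt_trans (ih h) (by assumption)
    · exact ih h

theorem km_some_eq_filter (l : List Int) (m : Int) :
    km l (some m) = (km l none).filter (· < m) := by
  induction l generalizing m with
  | nil => simp [km]
  | cons x l ih =>
    by_cases hx : x < m
    · simp only [km, List.filter_cons, decide_eq_true_eq, hx, if_pos]
      congr 1
      exact (List.filter_eq_self.mpr (fun y hy => by
        exact decide_eq_true (lt_trans (km_lt hy) hx))).symm
    · simp only [km, List.filter_cons, decide_eq_true_eq, hx, if_neg, not_false_iff]
      rw [ih m, ih x, List.filter_filter]
      refine List.filter_congr (fun y _ => ?_)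
      by_cases hy : y < m
      · have : y < x := lt_of_lt_of_le hy (not_lt.mp hx)
        simp [hy, this]
      · simp [hy]

theorem km_pairwise (l : List Int) (o : Option Int) : (km l o).Pairwise (· > ·) := by
  induction l generalizing o with
  | nil => simp [km]
  | cons x l ih =>
    cases o with
    | none =>
      simp only [km, List.pairwise_cons]
      exact ⟨fun y hy => km_lt hy, ih (some x)⟩
    | some m =>
      simp only [km]
      split
      · simp only [List.pairwise_cons]
        exact ⟨fun y hy => km_lt hy, ih (some x)⟩
      · exact ih (some m)

-- A's pop phase on one element, as a function of the stack.
def popGE (x : Int) : List Int → List Int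
  | [] => []
  | t :: rest => if x ≤ t then popGE x rest else t :: rest

theorem popGE_eq_filter {L : List Int} (x : Int) (h : L.Pairwise (· > ·)) :
    popGE x L = L.filter (· < x) := by
  induction L with
  | nil => simp [popGE]
  | cons t rest ih =>
    rcases List.pairwise_cons.mp h with ⟨hall, hrest⟩
    by_cases hx : x ≤ t
    · simp only [popGE, if_pos hx, List.filter_cons, decide_eq_true_eq, not_lt.mpr hx,
        if_neg, not_false_iff]
      exact ih hrest
    · simp only [popGE, if_neg hx, List.filter_cons, decide_eq_true_eq,
        if_pos (not_le.mp hx)]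
      congr 1
      exact (List.filter_eq_self.mpr (fun y hy => by
        exact decide_eq_true (lt_trans (hall y hy) (not_le.mp hx)))).symm

-- Processing one element in A's loop = pop everything ≥ arr[i], then push.
theorem solutionLoop_step (arr : List Int) (i : Nat) (h : i < arr.length) (stk : List Int) :
    solutionLoop arr stk i = solutionLoop arr (arr[i] :: popGE arr[i] stk) (i + 1) := by
  induction stk with
  | nil => rw [solutionLoop]; simp [h, popGE]
  | cons t rest ih =>
    rw [solutionLoop]
    by_cases hlt : t < arr[i]
    · simp [h, hlt, popGE, not_le.mpr hlt]
    · have hle : arr[i] ≤ t := not_lt.mp hlt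
      simp only [h, dif_pos, List.length_cons, Nat.succ_ne_zero, if_false, List.headD_cons,
        hlt, List.tail_cons, popGE, if_pos hle]
      exact ih

theorem solutionLoop_eq_foldl (arr : List Int) (n : Nat) :
    ∀ i stk, arr.length - i = n →
      solutionLoop arr stk i =
        List.foldl (fun stk x => x :: popGE x stk) stk (arr.drop i) := by
  induction n with
  | zero =>
    intro i stk hn
    have hge : arr.length ≤ i := by omega
    rw [solutionLoop]
    simp [Nat.not_lt.mpr hge, List.drop_eq_nil_of_le hge]
  | succ n ih =>
    intro i stk hn
    have h : i < arr.length := by omega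
    rw [solutionLoop_step arr i h, List.drop_eq_getElem_cons h, List.foldl_cons]
    exact ih (i + 1) _ (by omega)

-- A's whole fold computes km (right-to-left strict minima), by induction from the right.
theorem foldl_stack_eq_km (arr : List Int) :
    List.foldl (fun stk x => x :: popGE x stk) [] arr = km arr.reverse none := by
  induction arr using List.reverseRecOn with
  | nil => simp [km]
  | append_singleton xs x ih =>
    rw [List.foldl_append, List.foldl_cons, List.foldl_nil, ih,
      popGE_eq_filter x (km_pairwise _ _), ← km_some_eq_filter]
    simp [km]

-- B's fold accumulates km in its first component.
theorem foldl_b_eq_km (l : List Int) : ∀ (res : List Int) (o : Option Int),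
    (l.foldl
      (fun (st : List Int × Option Int) x =>
        match st.2 with
        | none => (st.1 ++ [x], some x)
        | some m => if x < m then (st.1 ++ [x], some x) else st)
      (res, o)).1 = res ++ km l o := by
  induction l with
  | nil => intro res o; simp [km]
  | cons x l ih =>
    intro res o
    cases o with
    | none => simp [km, ih]
    | some m =>
      by_cases hx : x < m
      · simp [km, hx, ih]
      · simp [km, hx, ih]

-- ===== VERDICT (by name: the statement is the Claim_ definition above) =====
theorem solution_spec : Claim_equal_solution := by
  intro arr _
  unfold Spec_solution solution solution_alt
  rw [solutionLoop_eq_foldl arr (arr.length - 0) 0 [] rfl]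
  simp only [List.drop_zero, foldl_stack_eq_km, foldl_b_eq_km, List.nil_append]
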